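-- pv_equiv track=rewrite | github.com/pypi-data/pypi-mirror-329 | packages/beprint/beprint-0.1.3.tar.gz/beprint-0.1.3/beprint/layout/base.py | at_width
-- ===== SOURCE A (Python) =====
-- def _char_width(c: str) -> int:
--     if c == '\t':
--         return 4
--     if ord(c) < 256:
--         return 1
--     table_str = '┌┬┐├┼┤└┴┘╓╥╖╟╫╢╙╨╜╒╤╕╞╪╡╘╧╛'
--     if c in table_str:
--         return 1
--     return 2
--
-- def at_width(text: str, index: int) -> str:
--     current = 0
--     for i, c in enumerate(text):
--         current += _char_width(c)
--         if current - 1 == index: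
--             return c
--         elif current - 1 > index:
--             return ''
--     raise IndexError('Index out of range')
-- ===== SOURCE B (Python) =====
-- def _char_width(c: str) -> int:
--     if c == '\t':
--         return 4
--     if ord(c) < 256:
--         return 1
--     table_str = '┌┬┐├┼┤└┴┘╓╥╖╟╫╢╙╨╜╒╤╕╞╪╡╘╧╛'
--     if c in table_str:
--         return 1
--     return 2
--
-- def at_width(text: str, index: int) -> str:
--     mapping = {}
--     width = 0
--     for c in text:
--         width += _char_width(c)
--         mapping[width - 1] = c
--     if not text or index >= width:
--         raise IndexError('Index out of range')
--     return mapping.get(index, '')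
-- ===== Notes on version B (the rewrite author's own statement) =====
-- stated objective: alternative
-- what changed: B replaces A's early-exiting running-width scan by building a dict mapping each character's final display column to the character in one full pass, then answering the query with a single dict lookup whose '' default covers padding columns; Pre_ excludes exactly the inputs where A (and B) raise IndexError: empty text or index at least the total display width.
import Mathlib
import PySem

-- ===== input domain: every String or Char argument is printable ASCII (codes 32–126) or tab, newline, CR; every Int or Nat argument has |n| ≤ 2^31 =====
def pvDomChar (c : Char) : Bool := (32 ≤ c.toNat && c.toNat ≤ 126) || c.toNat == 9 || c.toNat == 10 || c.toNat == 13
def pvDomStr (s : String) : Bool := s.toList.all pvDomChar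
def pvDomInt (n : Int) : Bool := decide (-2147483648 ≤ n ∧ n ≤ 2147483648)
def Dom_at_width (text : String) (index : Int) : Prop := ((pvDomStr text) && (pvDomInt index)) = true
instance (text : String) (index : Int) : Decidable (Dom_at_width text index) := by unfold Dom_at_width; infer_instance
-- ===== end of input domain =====

-- One honest line: B builds a dict mapping each char's final display column to the char
-- in one full pass, then answers by a single lookup ('' default for padding columns),
-- instead of A's early-exiting running-width scan (alternative decomposition, same cost).


-- ===== PORT A =====
def charWidthA (c : Char) : Int :=
  if c = '\t' then 4
  else if (c.toNat : Int) < 256 then 1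
  else if ("┌┬┐├┼┤└┴┘╓╥╖╟╫╢╙╨╜╒╤╕╞╪╡╘╧╛".toList).contains c then 1
  else 2

def atWidthGoA (index : Int) : List Char → Int → String
  | [], _ => ""            -- Python: raise IndexError (excluded by Pre_)
  | c :: rest, current =>
      let cur := current + charWidthA c
      if cur - 1 = index then String.mk [c]
      else if cur - 1 > index then ""
      else atWidthGoA index rest cur

def at_width (text : String) (index : Int) : String :=
  atWidthGoA index text.toList 0

-- ===== PORT B =====
def charWidthB (c : Char) : Int :=
  if c = '\t' then 4
  else if (c.toNat : Int) < 256 then 1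
  else if ("┌┬┐├┼┤└┴┘╓╥╖╟╫╢╙╨╜╒╤╕╞╪╡╘╧╛".toList).contains c then 1
  else 2

def at_width_alt (text : String) (index : Int) : String :=
  let st := text.toList.foldl
    (fun (p : Int × PySem.Dict Int String) c =>
      (p.1 + charWidthB c, p.2.insert (p.1 + charWidthB c - 1) (String.mk [c])))
    (0, PySem.Dict.empty)
  if text.toList = [] ∨ st.1 ≤ index then ""   -- Python: raise IndexError (excluded by Pre_)
  else (st.2.get? index).getD ""

-- ===== PRECONDITION & SPEC =====
-- Pre_ excludes exactly the inputs on which the Python A raises IndexError (as does B):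
-- empty text, or index at least the total display width of text.
def preCharWidth (c : Char) : Int :=
  if c = '\t' then 4
  else if (c.toNat : Int) < 256 then 1
  else if ("┌┬┐├┼┤└┴┘╓╥╖╟╫╢╙╨╜╒╤╕╞╪╡╘╧╛".toList).contains c then 1
  else 2

def Pre_at_width (text : String) (index : Int) : Prop :=
  text.toList ≠ [] ∧ index < text.toList.foldl (fun a c => a + preCharWidth c) 0
instance (text : String) (index : Int) : Decidable (Pre_at_width text index) := by
  unfold Pre_at_width; infer_instance

def pvWitness_at_width : String × Int := ("a\tb", 3)

def Spec_at_width (text : String) (index : Int) (out : String) : Prop := out = at_width_alt text index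
instance (text : String) (index : Int) (out : String) : Decidable (Spec_at_width text index out) := by unfold Spec_at_width; infer_instance

-- ===== CLAIM (what is proved, stated in full; the proofs are below) =====
def Claim_equal_at_width : Prop := ∀ (text : String) (index : Int), Dom_at_width text index → Pre_at_width text index → Spec_at_width text index (at_width text index)

-- ===== LEMMAS AND PROOFS =====

lemma cwB_pos (c : Char) : 1 ≤ charWidthB c := by
  unfold charWidthB; split_ifs <;> norm_num

lemma cwA_eq_cwB (c : Char) : charWidthA c = charWidthB c := rfl

lemma preCW_eq_cwB (c : Char) : preCharWidth c = charWidthB c := rfl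

-- the fold's first component is the running display width
lemma fold_fst (l : List Char) : ∀ (cur : Int) (d : PySem.Dict Int String),
    (l.foldl (fun (p : Int × PySem.Dict Int String) c =>
        (p.1 + charWidthB c, p.2.insert (p.1 + charWidthB c - 1) (String.mk [c]))) (cur, d)).1
      = l.foldl (fun a c => a + charWidthB c) cur := by
  induction l with
  | nil => intro cur d; rfl
  | cons c rest ih => intro cur d; simpa using ih (cur + charWidthB c) _

-- keys inserted from running width cur on are ≥ cur: lookups below cur are untouched
lemma fold_get_lt (l : List Char) : ∀ (cur : Int) (d : PySem.Dict Int String) (k : Int),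
    k < cur →
    ((l.foldl (fun (p : Int × PySem.Dict Int String) c =>
        (p.1 + charWidthB c, p.2.insert (p.1 + charWidthB c - 1) (String.mk [c]))) (cur, d)).2).get? k
      = d.get? k := by
  induction l with
  | nil => intro cur d k _; rfl
  | cons c rest ih =>
      intro cur d k hk
      have hw := cwB_pos c
      rw [List.foldl_cons, ih (cur + charWidthB c) _ k (by omega),
        PySem.Dict.get?_insert_of_ne _ _ (by omega)]

-- key invariant: A's scan from running width cur equals the dict lookup, for any
-- starting dict not containing the queried key
lemma key (l : List Char) : ∀ (cur index : Int) (d : PySem.Dict Int String),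
    cur ≤ index → d.get? index = none →
    atWidthGoA index l cur
      = (((l.foldl (fun (p : Int × PySem.Dict Int String) c =>
            (p.1 + charWidthB c, p.2.insert (p.1 + charWidthB c - 1) (String.mk [c]))) (cur, d)).2).get? index).getD "" := by
  induction l with
  | nil => intro cur index d _ hd; simp [atWidthGoA, hd]
  | cons c rest ih =>
      intro cur index d hle hd
      rw [atWidthGoA, List.foldl_cons]
      simp only [cwA_eq_cwB]
      by_cases h1 : cur + charWidthB c - 1 = index
      · rw [if_pos h1, fold_get_lt rest _ _ index (by omega), h1,
          PySem.Dict.get?_insert_self]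
        rfl
      · by_cases h2 : cur + charWidthB c - 1 > index
        · rw [if_neg h1, if_pos h2, fold_get_lt rest _ _ index (by omega),
            PySem.Dict.get?_insert_of_ne _ _ (by omega), hd]
          rfl
        · have hd' : (d.insert (cur + charWidthB c - 1) (String.mk [c])).get? index = none := by
            rw [PySem.Dict.get?_insert_of_ne _ _ (by omega)]; exact hd
          rw [if_neg h1, if_neg h2, ih (cur + charWidthB c) index _ (by omega) hd']

-- on a negative index with nonempty text, A's first iteration returns ""
lemma at_width_neg (text : String) (index : Int)
    (hne : text.toList ≠ []) (h : index < 0) : at_width text index = "" := by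
  unfold at_width
  obtain ⟨c, rest, hl⟩ := List.exists_cons_of_ne_nil hne
  have hw := cwB_pos c
  rw [hl, atWidthGoA]
  simp only [cwA_eq_cwB]
  rw [if_neg (by omega), if_pos (by omega)]

-- ===== VERDICT (by name: the statement is the Claim_ definition above) =====
theorem at_width_spec : Claim_equal_at_width := by
  intro text index _ hpre
  unfold Spec_at_width
  obtain ⟨hne, hlt⟩ := hpre
  have hwidth : index < text.toList.foldl (fun a c => a + charWidthB c) 0 := by
    simpa only [preCW_eq_cwB] using hlt
  unfold at_width_alt
  simp only []
  rw [fold_fst]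
  rw [if_neg (by push Not; exact ⟨hne, by omega⟩)]
  by_cases h0 : 0 ≤ index
  · exact key text.toList 0 index PySem.Dict.empty h0 rfl
  · rw [at_width_neg text index hne (by omega),
      fold_get_lt text.toList 0 _ index (by omega)]
    rfl
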